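-- pv_equiv track=rewrite | github.com/peterswimm/extending-move | core/euclidean.py | euclidean_rhythm
-- ===== SOURCE A (Python) =====
-- from typing import List, Dict, Any
--
-- def euclidean_rhythm(steps: int, pulses: int, rotate: int = 0) -> List[int]:
--     """Generate a Euclidean rhythm as step indices (0-based)."""
--     if steps <= 0:
--         raise ValueError("steps must be positive")
--     pulses = max(0, min(pulses, steps))
--     rotate = rotate % steps
--     pattern: List[int] = []
--     bucket = 0
--     for step in range(steps):
--         bucket += pulses
--         if bucket >= steps:
--             bucket -= steps
--             pattern.append((step + rotate) % steps)
--     return sorted(pattern)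
-- ===== SOURCE B (Python) =====
-- def euclidean_rhythm(steps: int, pulses: int, rotate: int = 0):
--     """Generate a Euclidean rhythm as step indices (0-based)."""
--     if steps <= 0:
--         raise ValueError("steps must be positive")
--     p = max(0, min(pulses, steps))
--     r = rotate % steps
--     # pulse j (1-based) lands on step ceil(j*steps/p) - 1; rotate and sort
--     return sorted((-(-(j * steps) // p) - 1 + r) % steps for j in range(1, p + 1))
-- ===== Notes on version B (the rewrite author's own statement) =====
-- stated objective: alternative
-- what changed: Replaces the O(steps) bucket-accumulator loop over every step with the closed form: pulse j lands on step ceil(j*steps/pulses)-1, computed directly for each of the pulses pulses (O(pulses log pulses) work instead of a scan of all steps).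
-- outside the precondition, e.g. on euclidean_rhythm(0, 3, 0): A raises ValueError, B raises ValueError
import Mathlib
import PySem

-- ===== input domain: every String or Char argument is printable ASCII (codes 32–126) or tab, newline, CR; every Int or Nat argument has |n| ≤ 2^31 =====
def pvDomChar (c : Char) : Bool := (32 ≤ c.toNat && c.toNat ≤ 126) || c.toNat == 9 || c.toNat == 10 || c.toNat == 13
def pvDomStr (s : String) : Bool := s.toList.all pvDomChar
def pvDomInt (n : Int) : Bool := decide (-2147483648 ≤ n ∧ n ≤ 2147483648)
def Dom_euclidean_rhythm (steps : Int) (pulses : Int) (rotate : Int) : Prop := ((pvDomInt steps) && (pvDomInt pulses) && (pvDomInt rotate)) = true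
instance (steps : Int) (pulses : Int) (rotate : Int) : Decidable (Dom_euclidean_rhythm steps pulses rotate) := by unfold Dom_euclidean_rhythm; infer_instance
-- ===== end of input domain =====

-- B replaces A's bucket-accumulator loop over every step by the closed form ceil(j*steps/pulses)-1 per pulse (alternative algorithm, same result).

-- ===== PORT A =====
def euclidean_rhythm (steps : Int) (pulses : Int) (rotate : Int) : List Int :=
  if steps ≤ 0 then []  -- Python A raises ValueError here; excluded by Pre_
  else
    let p := max 0 (min pulses steps)
    let r := PySem.Int.mod rotate steps
    let st := (PySem.List.pyRange 0 steps 1).foldl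
      (fun (st : Int × List Int) step =>
        let bucket := st.1 + p
        if steps ≤ bucket then (bucket - steps, st.2 ++ [PySem.Int.mod (step + r) steps])
        else (bucket, st.2)) ((0 : Int), ([] : List Int))
    PySem.List.sorted st.2 id

-- ===== PORT B =====
def euclidean_rhythm_alt (steps : Int) (pulses : Int) (rotate : Int) : List Int :=
  if steps ≤ 0 then []  -- Python B raises ValueError here; excluded by Pre_
  else
    let p := max 0 (min pulses steps)
    let r := PySem.Int.mod rotate steps
    PySem.List.sorted
      ((PySem.List.pyRange 1 (p + 1) 1).map
        (fun j => PySem.Int.mod (-(PySem.Int.floordiv (-(j * steps)) p) - 1 + r) steps)) id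

-- ===== PRECONDITION & SPEC =====
-- A raises ValueError exactly when steps ≤ 0 (B raises there too).
def Pre_euclidean_rhythm (steps : Int) (pulses : Int) (rotate : Int) : Prop := 0 < steps
instance (steps : Int) (pulses : Int) (rotate : Int) : Decidable (Pre_euclidean_rhythm steps pulses rotate) := by unfold Pre_euclidean_rhythm; infer_instance
def pvWitness_euclidean_rhythm : Int × Int × Int := (8, 3, 2)

def Spec_euclidean_rhythm (steps : Int) (pulses : Int) (rotate : Int) (out : List Int) : Prop := out = euclidean_rhythm_alt steps pulses rotate
instance (steps : Int) (pulses : Int) (rotate : Int) (out : List Int) : Decidable (Spec_euclidean_rhythm steps pulses rotate out) := by unfold Spec_euclidean_rhythm; infer_instance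

-- ===== CLAIM (what is proved, stated in full; the proofs are below) =====
def Claim_equal_euclidean_rhythm : Prop := ∀ (steps : Int) (pulses : Int) (rotate : Int), Dom_euclidean_rhythm steps pulses rotate → Pre_euclidean_rhythm steps pulses rotate → Spec_euclidean_rhythm steps pulses rotate (euclidean_rhythm steps pulses rotate)

-- ===== LEMMAS AND PROOFS =====

-- Loop invariant: after folding A's body over range(k), the bucket is b and the
-- pattern is exactly B's closed-form list for the first m pulses, where k*p = s*m + b, 0 ≤ b < s.
theorem euclidean_rhythm_inv (s p r : Int) (hs : 0 < s) (hp0 : 0 ≤ p) (hps : p ≤ s)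
    (k : Nat) (hk : (k : Int) ≤ s) :
    ∃ m b : Int, 0 ≤ m ∧ 0 ≤ b ∧ b < s ∧ (k : Int) * p = s * m + b ∧
      (PySem.List.pyRange 0 (k : Int) 1).foldl
        (fun (st : Int × List Int) step =>
          let bucket := st.1 + p
          if s ≤ bucket then (bucket - s, st.2 ++ [PySem.Int.mod (step + r) s])
          else (bucket, st.2)) ((0 : Int), ([] : List Int))
      = (b, (PySem.List.pyRange 1 (m + 1) 1).map
          (fun j => PySem.Int.mod (-(PySem.Int.floordiv (-(j * s)) p) - 1 + r) s)) := by
  induction k with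
  | zero =>
    refine ⟨0, 0, le_refl 0, le_refl 0, hs, by ring, ?_⟩
    push_cast
    rw [PySem.List.pyRange_one_eq_nil (by norm_num : (0:Int) ≤ 0),
        PySem.List.pyRange_one_eq_nil (by norm_num : (1:Int) ≤ 1)]
    simp
  | succ k ih =>
    obtain ⟨m, b, hm0, hb0, hbs, hkp, hfold⟩ := ih (by push_cast at hk ⊢; omega)
    have hsplit : PySem.List.pyRange 0 ((k : Int) + 1) 1
        = PySem.List.pyRange 0 (k : Int) 1 ++ [(k : Int)] :=
      PySem.List.pyRange_one_succ_right (by positivity : (0:Int) ≤ (k:Int))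
    push_cast
    rw [hsplit, List.foldl_append, hfold]
    by_cases hfire : s ≤ b + p
    · -- the bucket overflows: pulse number m+1 fires at step k
      have hp_pos : 0 < p := by omega
      have hms : (m + 1) * s = (k : Int) * p - b + s := by linear_combination -hkp
      have hceil : -(PySem.Int.floordiv (-((m + 1) * s)) p) = (k : Int) + 1 := by
        rw [PySem.Int.neg_floordiv_neg_eq_iff_of_pos hp_pos]
        constructor
        · nlinarith
        · nlinarith
      refine ⟨m + 1, b + p - s, by omega, by omega, by omega, by linear_combination hkp, ?_⟩
      have hrange : PySem.List.pyRange 1 (m + 1 + 1) 1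
          = PySem.List.pyRange 1 (m + 1) 1 ++ [m + 1] :=
        PySem.List.pyRange_one_succ_right (by omega : (1:Int) ≤ m + 1)
      simp only [List.foldl, if_pos hfire, hrange, List.map_append, List.map_cons, List.map_nil]
      rw [hceil]
      ring_nf
    · refine ⟨m, b + p, hm0, by omega, by omega, by linear_combination hkp, ?_⟩
      simp only [List.foldl, if_neg hfire]

-- ===== VERDICT (by name: the statement is the Claim_ definition above) =====
theorem euclidean_rhythm_spec : Claim_equal_euclidean_rhythm := by
  intro steps pulses rotate _ hpre
  unfold Spec_euclidean_rhythm euclidean_rhythm euclidean_rhythm_alt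
  have hs0 : (0:Int) < steps := hpre
  have hns : ¬ steps ≤ 0 := by omega
  rw [if_neg hns, if_neg hns]
  set p := max 0 (min pulses steps) with hp
  have hp0 : 0 ≤ p := le_max_left 0 _
  have hps : p ≤ steps := by rw [hp]; omega
  obtain ⟨m, b, hm0, hb0, hbs, hkp, hfold⟩ :=
    euclidean_rhythm_inv steps p (PySem.Int.mod rotate steps) hpre hp0 hps steps.toNat
      (by omega)
  have hcast : ((steps.toNat : Int)) = steps := Int.toNat_of_nonneg (by omega)
  rw [hcast] at hkp hfold
  -- from steps * p = steps * m + b, 0 ≤ b < steps: m = p and b = 0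
  have hmp : m = p := by
    rcases lt_trichotomy m p with h | h | h
    · exfalso
      have h1 : steps * 1 ≤ steps * (p - m) :=
        mul_le_mul_of_nonneg_left (by omega) (by omega)
      nlinarith
    · exact h
    · exfalso
      have h1 : steps * 1 ≤ steps * (m - p) :=
        mul_le_mul_of_nonneg_left (by omega) (by omega)
      nlinarith
  simp only [hfold, hmp]
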